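-- pv_equiv track=rewrite | github.com/haya14busa/topcoder | Single Round Match 670/Drbalance.py | lesscng
-- ===== SOURCE A (Python) =====
-- def negativity(sum_table):
--     return len(list(filter(lambda x: x < 0, sum_table)))
--
-- def lesscng(s, k):
--     xs = list(map(lambda x: 1 if x == '+' else -1, list(s)))
--     assert 1 <= len(xs) <= 50
--
--     sum_table = [sum(xs)]
--     accum_sum = sum(xs)
--     for x in reversed(xs[1:]):
--         accum_sum -= x
--         sum_table.append(accum_sum)
--
--     negative_idxs = []
--     for i, x in enumerate(xs):
--         if x < 0:
--             negative_idxs.append(i)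
--
--     l = len(sum_table)
--     cnt = 0
--     for ni in negative_idxs:
--         if negativity(sum_table) <= k:
--             break
--         for i in range(l - ni):
--             sum_table[i] += 2
--         cnt += 1
--     return cnt
-- ===== SOURCE B (Python) =====
-- def lesscng(s, k):
--     xs = [1 if c == '+' else -1 for c in s]
--     assert 1 <= len(xs) <= 50
--
--     def negcount(ys):
--         acc = 0
--         c = 0
--         for y in ys:
--             acc += y
--             if acc < 0:
--                 c += 1
--         return c
--
--     cnt = 0
--     for i, x in enumerate(xs):
--         if x < 0:
--             if negcount(xs) <= k:
--                 break
--             xs[i] = 1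
--             cnt += 1
--     return cnt
-- ===== Notes on version B (the rewrite author's own statement) =====
-- stated objective: simpler
-- what changed: Replaces A's pre-built reversed sum_table with incremental +2 range patches by a fresh left-to-right prefix-sum rescan of the mutable +-1 array before each flip; no table, no index arithmetic.
import Mathlib
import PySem

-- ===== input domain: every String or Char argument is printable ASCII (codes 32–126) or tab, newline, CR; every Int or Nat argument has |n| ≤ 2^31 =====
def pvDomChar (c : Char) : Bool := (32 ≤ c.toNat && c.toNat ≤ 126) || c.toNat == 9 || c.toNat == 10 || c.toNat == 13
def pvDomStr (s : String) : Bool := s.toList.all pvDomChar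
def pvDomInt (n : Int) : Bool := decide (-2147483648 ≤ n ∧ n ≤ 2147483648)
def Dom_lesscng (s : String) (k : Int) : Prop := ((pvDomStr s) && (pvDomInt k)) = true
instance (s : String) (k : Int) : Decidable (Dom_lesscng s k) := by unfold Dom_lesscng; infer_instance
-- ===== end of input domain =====

-- B replaces A's pre-built reversed sum_table (patched with +2 over index ranges) by a fresh
-- left-to-right prefix-sum rescan of the mutable ±1 array before each flip (objective: simpler).

-- ===== PORT A =====
-- helper negativity(sum_table)
def pvNegativity (st : List Int) : Int := ((st.filter (fun x => decide (x < 0))).length : Int)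

-- one step of the sum_table-building loop: accum_sum -= x; sum_table.append(accum_sum)
def pvBuildStep (p : List Int × Int) (x : Int) : List Int × Int :=
  (p.1 ++ [p.2 - x], p.2 - x)

-- 'for i in range(m): sum_table[i] += 2' (m ≤ 0 gives the empty range)
def pvBump : Nat → List Int → List Int
  | 0, st => st
  | _ + 1, [] => []
  | m + 1, v :: rest => (v + 2) :: pvBump m rest

-- 'for ni in negative_idxs: if negativity(sum_table) <= k: break; …' (break = return cnt)
def pvLoopA (k l : Int) : List Int → List Int → Int → Int
  | _, [], cnt => cnt
  | st, ni :: rest, cnt =>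
    if pvNegativity st ≤ k then cnt
    else pvLoopA k l (pvBump (l - ni).toNat st) rest (cnt + 1)

def lesscng (s : String) (k : Int) : Int :=
  let xs : List Int := s.toList.map (fun c => if c = '+' then 1 else -1)
  let sum_table := ((xs.drop 1).reverse.foldl pvBuildStep ([xs.sum], xs.sum)).1
  let negative_idxs :=
    ((PySem.List.enumerate xs 0).filter (fun p => decide (p.2 < 0))).map (·.1)
  pvLoopA k (sum_table.length : Int) sum_table negative_idxs 0

-- ===== PORT B =====
-- one step of negcount's loop: acc += y; if acc < 0: c += 1
def pvNCStep (p : Int × Int) (y : Int) : Int × Int :=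
  (p.1 + y, if p.1 + y < 0 then p.2 + 1 else p.2)

def pvNegcount (ys : List Int) : Int := (ys.foldl pvNCStep (0, 0)).2

-- 'for i, x in enumerate(xs): …' carrying the mutable list; only already-visited positions
-- are ever mutated, so iterating the enumeration of the original list is exact
def pvLoopB (k : Int) : List Int → List (Int × Int) → Int → Int
  | _, [], cnt => cnt
  | cur, (i, x) :: rest, cnt =>
    if x < 0 then
      if pvNegcount cur ≤ k then cnt
      else pvLoopB k (PySem.List.pySetD cur i 1) rest (cnt + 1)
    else pvLoopB k cur rest cnt

def lesscng_alt (s : String) (k : Int) : Int :=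
  let xs : List Int := s.toList.map (fun c => if c = '+' then 1 else -1)
  pvLoopB k xs (PySem.List.enumerate xs 0) 0

-- ===== PRECONDITION & SPEC =====
-- Pre_ excludes exactly the inputs on which A's own 'assert 1 <= len(xs) <= 50' raises AssertionError.
def Pre_lesscng (s : String) (k : Int) : Prop :=
  1 ≤ s.toList.length ∧ s.toList.length ≤ 50

instance (s : String) (k : Int) : Decidable (Pre_lesscng s k) := by
  unfold Pre_lesscng; infer_instance

def pvWitness_lesscng : String × Int := ("-+-", 0)

def Spec_lesscng (s : String) (k : Int) (out : Int) : Prop := out = lesscng_alt s k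
instance (s : String) (k : Int) (out : Int) : Decidable (Spec_lesscng s k out) := by
  unfold Spec_lesscng; infer_instance

-- ===== CLAIM (what is proved, stated in full; the proofs are below) =====
def Claim_equal_lesscng : Prop :=
  ∀ (s : String) (k : Int), Dom_lesscng s k → Pre_lesscng s k → Spec_lesscng s k (lesscng s k)

-- ===== LEMMAS AND PROOFS =====

-- the reversed prefix-sum table: entry j holds the sum of the first (n - j) elements
def pvRps (xs : List Int) : List Int :=
  (List.range xs.length).map (fun j => (xs.take (xs.length - j)).sum)

theorem pvFold_rev (ys : List Int) : ∀ (table : List Int) (a : Int),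
    ys.reverse.foldl pvBuildStep (table, a)
      = (table ++ (List.range ys.length).map
            (fun j => a - (ys.drop (ys.length - (j + 1))).sum),
         a - ys.sum) := by
  induction ys using List.reverseRecOn with
  | nil => simp
  | append_singleton zs z ih =>
    intro table a
    rw [List.reverse_concat]
    simp only [List.foldl_cons]
    show List.foldl pvBuildStep (pvBuildStep (table, a) z) zs.reverse = _
    rw [show pvBuildStep (table, a) z = (table ++ [a - z], a - z) from rfl, ih]
    apply Prod.ext <;> simp only
    · rw [List.append_assoc]
      congr 1
      have hlen : (zs ++ [z]).length = zs.length + 1 := by simp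
      rw [hlen, List.range_succ_eq_map, List.map_cons, List.map_map]
      have h0 : a - ((zs ++ [z]).drop (zs.length + 1 - (0 + 1))).sum = a - z := by
        rw [Nat.add_sub_cancel, List.drop_left]; simp
      rw [h0]
      rw [List.singleton_append]
      congr 1
      apply List.map_congr_left
      intro j hj
      have hj' : j < zs.length := List.mem_range.mp hj
      simp only [Function.comp]
      have hidx : zs.length + 1 - (j + 1 + 1) = zs.length - (j + 1) := by omega
      have hd : (zs ++ [z]).drop (zs.length + 1 - (j + 1 + 1)) =
          zs.drop (zs.length - (j + 1)) ++ [z] := by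
        rw [hidx, List.drop_append_of_le_length (by omega)]
      rw [hd]
      simp; ring
    · simp; ring

theorem pvBuild_eq (xs : List Int) (h : xs ≠ []) :
    ((xs.drop 1).reverse.foldl pvBuildStep ([xs.sum], xs.sum)).1 = pvRps xs := by
  obtain ⟨x, t, rfl⟩ := List.exists_cons_of_ne_nil h
  rw [show (x :: t).drop 1 = t from rfl, pvFold_rev]
  simp only
  unfold pvRps
  rw [show (x :: t).length = t.length + 1 from rfl, List.range_succ_eq_map,
    List.map_cons, List.map_map]
  rw [List.singleton_append]
  congr 1
  · simp
  · apply List.map_congr_left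
    intro j hj
    have hj' : j < t.length := List.mem_range.mp hj
    simp only [Function.comp]
    have h1 : t.length - (j + 1) + 1 = t.length + 1 - Nat.succ j := by omega
    have h2 : (x :: t).take (t.length + 1 - Nat.succ j) = x :: t.take (t.length - (j + 1)) := by
      rw [← h1]; rfl
    rw [h2]
    have h3 : t.take (t.length - (j + 1)) ++ t.drop (t.length - (j + 1)) = t :=
      List.take_append_drop _ t
    have h4 : (t.take (t.length - (j + 1))).sum + (t.drop (t.length - (j + 1))).sum = t.sum := by
      rw [← List.sum_append, h3]
    simp only [List.sum_cons]
    omega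

theorem pvNegcount_fold (xs : List Int) :
    xs.foldl pvNCStep (0, 0)
      = (xs.sum,
         (((List.range xs.length).filter
             (fun m => decide ((xs.take (m + 1)).sum < 0))).length : Int)) := by
  induction xs using List.reverseRecOn with
  | nil => simp
  | append_singleton t x ih =>
    rw [List.foldl_concat, ih]
    apply Prod.ext <;> simp only
    · simp [pvNCStep]
    · show (if t.sum + x < 0 then _ + 1 else _) = _
      rw [show (t ++ [x]).length = t.length + 1 from by simp, List.range_succ,
        List.filter_append]
      have hlast : List.filter (fun m => decide (((t ++ [x]).take (m + 1)).sum < 0)) [t.length]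
          = if t.sum + x < 0 then [t.length] else [] := by
        simp only [List.filter_cons, List.filter_nil]
        have : (t ++ [x]).take (t.length + 1) = t ++ [x] := by
          apply List.take_of_length_le; simp
        rw [this]
        by_cases hc : t.sum + x < 0 <;> simp [hc]
      have hinit : List.filter (fun m => decide (((t ++ [x]).take (m + 1)).sum < 0)) (List.range t.length)
          = List.filter (fun m => decide ((t.take (m + 1)).sum < 0)) (List.range t.length) := by
        apply List.filter_congr
        intro j hj
        have : j < t.length := List.mem_range.mp hj
        rw [List.take_append_of_le_length (by omega)]
      rw [hlast, hinit]
      by_cases hc : t.sum + x < 0 <;> simp [hc]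

theorem pvCount_reindex (q : Nat → Bool) : ∀ n : Nat,
    ((List.range n).filter (fun j => q (n - j))).length
      = ((List.range n).filter (fun j => q (j + 1))).length := by
  intro n
  induction n with
  | zero => simp
  | succ n ih =>
    conv_lhs => rw [List.range_succ_eq_map]
    rw [List.range_succ]
    rw [List.filter_cons, List.filter_map, List.filter_append]
    have hmap : List.filter ((fun j => q (n + 1 - j)) ∘ Nat.succ) (List.range n)
        = List.filter (fun j => q (n - j)) (List.range n) := by
      apply List.filter_congr
      intro j hj
      simp only [Function.comp]
      congr 1
      omega
    rw [hmap]
    by_cases hc : q (n + 1) = true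
    · simp [hc, ih]
    · have hc' : q (n + 1) = false := by simpa using hc
      simp [hc', ih]

theorem pvNegativity_rps (cur : List Int) :
    pvNegativity (pvRps cur) = pvNegcount cur := by
  unfold pvNegativity pvRps pvNegcount
  rw [pvNegcount_fold]
  simp only
  rw [List.filter_map, List.length_map]
  have h := pvCount_reindex (fun m => decide ((cur.take m).sum < 0)) cur.length
  have hc : ((fun x => decide (x < 0)) ∘ fun j => (List.take (cur.length - j) cur).sum)
      = fun j => decide ((List.take (cur.length - j) cur).sum < 0) := rfl
  rw [hc, h]

theorem pvBump_map_range : ∀ (n : Nat) (m : Nat) (f : Nat → Int),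
    pvBump m ((List.range n).map f)
      = (List.range n).map (fun j => if j < m then f j + 2 else f j) := by
  intro n
  induction n with
  | zero => intro m f; cases m <;> simp [pvBump]
  | succ n ih =>
    intro m f
    rw [List.range_succ_eq_map, List.map_cons, List.map_cons, List.map_map, List.map_map]
    cases m with
    | zero => simp [pvBump]
    | succ m =>
      show (f 0 + 2) :: pvBump m _ = _
      rw [ih m]
      congr 1
      apply List.map_congr_left
      intro j hj
      simp only [Function.comp]
      by_cases hc : j < m <;> simp [hc]

theorem pvSum_take_set (cur : List Int) (i m : Nat) (v : Int)
    (him : i < m) (hm : m ≤ cur.length) :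
    ((cur.set i v).take m).sum = (cur.take m).sum - cur[i]! + v := by
  have hlen : (cur.take m).length = m := by simp [Nat.min_eq_left hm]
  rw [List.take_set]
  rw [List.sum_set]
  have hilt : i < (List.take m cur).length := by omega
  have hself : cur.take m = (cur.take m).set i ((cur.take m)[i]!) := by
    rw [List.getElem!_eq_getElem?_getD, List.getElem?_eq_getElem hilt, Option.getD_some]
    exact (List.set_getElem_self hilt).symm
  conv_rhs => rw [hself]
  rw [List.sum_set]
  have hgi : (cur.take m)[i]! = cur[i]! := by
    rw [List.getElem!_eq_getElem?_getD, List.getElem!_eq_getElem?_getD, List.getElem?_take_of_lt him]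
  rw [hgi]
  simp only [hlen, him, if_pos]
  ring

theorem pvBump_rps (cur : List Int) (i : Nat) (hi : i < cur.length)
    (hv : cur[i]? = some (-1)) :
    pvBump (cur.length - i) (pvRps cur) = pvRps (cur.set i 1) := by
  unfold pvRps
  rw [pvBump_map_range]
  rw [List.length_set]
  apply List.map_congr_left
  intro j hj
  have hj' : j < cur.length := List.mem_range.mp hj
  have hgi : cur[i]! = -1 := by
    rw [List.getElem!_eq_getElem?_getD, hv]; rfl
  by_cases hc : j < cur.length - i
  · have him : i < cur.length - j := by omega
    rw [if_pos hc, pvSum_take_set cur i (cur.length - j) 1 him (by omega), hgi]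
    ring
  · have him : cur.length - j ≤ i := by omega
    rw [if_neg hc, List.take_set_of_le him]

theorem pvLoop_eq (k : Int) : ∀ (enum : List (Int × Int)) (cur : List Int) (cnt : Int),
    (∀ p ∈ enum, ∃ j : Nat, p.1 = (j : Int) ∧ cur[j]? = some p.2 ∧ (p.2 = 1 ∨ p.2 = -1)) →
    enum.Pairwise (fun p q => p.1 < q.1) →
    pvLoopB k cur enum cnt
      = pvLoopA k (cur.length : Int) (pvRps cur)
          ((enum.filter (fun p => decide (p.2 < 0))).map (·.1)) cnt := by
  intro enum
  induction enum with
  | nil => intro cur cnt _ _; rfl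
  | cons p rest ih =>
    intro cur cnt hmem hpair
    obtain ⟨i, x⟩ := p
    obtain ⟨j, hji, hj?, hx⟩ := hmem (i, x) List.mem_cons_self
    simp only at hji hj? hx
    have hjlt : j < cur.length := by
      by_contra hge
      rw [List.getElem?_eq_none_iff.mpr (by omega)] at hj?
      simp at hj?
    by_cases hneg : x < 0
    · have hx1 : x = -1 := by rcases hx with h | h <;> omega
      rw [List.filter_cons_of_pos (by simpa using hneg), List.map_cons]
      show (if x < 0 then
              if pvNegcount cur ≤ k then cnt
              else pvLoopB k (PySem.List.pySetD cur i 1) rest (cnt + 1)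
            else pvLoopB k cur rest cnt) = _
      rw [if_pos hneg]
      show _ = (if pvNegativity (pvRps cur) ≤ k then cnt
            else pvLoopA k (cur.length : Int)
              (pvBump ((cur.length : Int) - i).toNat (pvRps cur))
              ((rest.filter (fun p => decide (p.2 < 0))).map (·.1)) (cnt + 1))
      rw [pvNegativity_rps]
      by_cases hk : pvNegcount cur ≤ k
      · rw [if_pos hk, if_pos hk]
      · rw [if_neg hk, if_neg hk]
        have hset : PySem.List.pySetD cur i 1 = cur.set j 1 := by
          rw [hji, PySem.List.pySetD_natCast]
        have htn : ((cur.length : Int) - i).toNat = cur.length - j := by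
          rw [hji]; omega
        have hbump : pvBump ((cur.length : Int) - i).toNat (pvRps cur)
            = pvRps (cur.set j 1) := by
          rw [htn]
          exact pvBump_rps cur j hjlt (by rw [hj?, hx1])
        have hlen : ((cur.set j 1).length : Int) = (cur.length : Int) := by
          rw [List.length_set]
        rw [hset, hbump, ← hlen]
        apply ih
        · intro q hq
          obtain ⟨j', hj'i, hj'?, hx'⟩ := hmem q (List.mem_cons_of_mem _ hq)
          refine ⟨j', hj'i, ?_, hx'⟩
          rw [List.getElem?_set_ne, hj'?]
          have hlt : (i : Int) < q.1 := (List.pairwise_cons.mp hpair).1 q hq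
          rw [hji, hj'i] at hlt
          omega
        · exact (List.pairwise_cons.mp hpair).2
    · rw [List.filter_cons_of_neg (by simpa using hneg)]
      show (if x < 0 then
              if pvNegcount cur ≤ k then cnt
              else pvLoopB k (PySem.List.pySetD cur i 1) rest (cnt + 1)
            else pvLoopB k cur rest cnt) = _
      rw [if_neg hneg]
      apply ih
      · intro q hq
        exact hmem q (List.mem_cons_of_mem _ hq)
      · exact (List.pairwise_cons.mp hpair).2

theorem lesscng_final (s : String) (k : Int) (hpre : 1 ≤ s.toList.length) :
    lesscng s k = lesscng_alt s k := by
  unfold lesscng lesscng_alt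
  simp only
  set xs : List Int := s.toList.map (fun c => if c = '+' then 1 else -1) with hxs
  have hlenxs : xs.length = s.toList.length := by rw [hxs]; simp
  have hvals : ∀ v ∈ xs, v = 1 ∨ v = -1 := by
    intro v hv
    rw [hxs] at hv
    obtain ⟨c, _, rfl⟩ := List.mem_map.mp hv
    by_cases hc : c = '+' <;> simp [hc]
  have hne : xs ≠ [] := by
    intro h
    have h0 : s.toList.length = 0 := by rw [← hlenxs, h]; rfl
    omega
  rw [pvBuild_eq xs hne]
  rw [show (pvRps xs).length = xs.length from by simp [pvRps]]
  refine (pvLoop_eq k (PySem.List.enumerate xs 0) xs 0 ?_ ?_).symm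
  · intro p hp
    rw [PySem.List.mem_enumerate_iff] at hp
    obtain ⟨j, hjlt, hpj⟩ := hp
    refine ⟨j, by rw [hpj]; simp, ?_, ?_⟩
    · rw [hpj]
      simp [List.getElem?_eq_getElem hjlt]
    · rw [hpj]
      exact hvals _ (List.getElem_mem hjlt)
  · exact PySem.List.pairwise_lt_enumerate xs 0

-- ===== VERDICT (by name: the statement is the Claim_ definition above) =====
theorem lesscng_spec : Claim_equal_lesscng := by
  intro s k _ hpre
  exact lesscng_final s k hpre.1
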